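-- pv_equiv track=rewrite | github.com/MKwang24/Recursion-Python | lab7.py | LucasNum
-- ===== SOURCE A (Python) =====
-- def LucasNum(start, stop, step):
--     """ (int,int,int) -> list of integers
--
--     Input: This function is passed start (>= 0), stop (>start), and step (>= 1) values that define a sequence of numbers.
--     Output: This function returns a list of the corresponding Lucas Numbers.
--
--     >>>LucasNum(0,6,1)
--     [2, 1, 3, 4, 7, 11]
--     >>>LucasNum(2,6,2)
--     [3, 7]
--     """
--     def Lucas(num):
--         if num == 0 :
--             result = 2
--         elif num == 1:
--             result = 1
--         else:
--             result  = Lucas(num-1)+Lucas(num-2)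
--         return result
--     numbers = range(start, stop, step)
--     numb = []
--     for number in numbers:
--         numb.append(number)
--     output = []
--     for n in numb:
--         output.append(Lucas(n))
--     return output
-- ===== SOURCE B (Python) =====
-- def LucasNum(start, stop, step):
--     indices = range(start, stop, step)
--     m = max(indices, default=1)
--     table = [2, 1]
--     a, b = 2, 1
--     for _ in range(2, m + 1):
--         a, b = b, a + b
--         table.append(b)
--     return [table[i] for i in indices]
-- ===== Notes on version B (the rewrite author's own statement) =====
-- stated objective: alternative
-- what changed: Replaces the naive exponential double recursion Lucas(n)=Lucas(n-1)+Lucas(n-2) with a single bottom-up pass that tabulates Lucas numbers up to the maximum requested index and then reads each answer off the table.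
import Mathlib
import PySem

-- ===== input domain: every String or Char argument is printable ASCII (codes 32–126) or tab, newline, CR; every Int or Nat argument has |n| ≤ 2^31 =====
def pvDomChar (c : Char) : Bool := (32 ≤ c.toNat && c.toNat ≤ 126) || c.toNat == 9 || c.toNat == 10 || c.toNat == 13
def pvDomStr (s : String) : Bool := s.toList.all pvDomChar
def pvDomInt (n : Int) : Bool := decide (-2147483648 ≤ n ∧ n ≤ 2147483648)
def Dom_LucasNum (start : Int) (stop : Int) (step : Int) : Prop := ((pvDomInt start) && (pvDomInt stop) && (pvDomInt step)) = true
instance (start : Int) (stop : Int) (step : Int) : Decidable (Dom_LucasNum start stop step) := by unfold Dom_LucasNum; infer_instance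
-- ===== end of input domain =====

-- B replaces A's exponential double recursion by one bottom-up tabulation up to the
-- largest requested index; equivalence proved on Pre_ below.


-- ===== PORT A =====
-- A's inner 'Lucas' is naive double recursion; it terminates only for num ≥ 0
-- (Pre_ guarantees every index is ≥ 0), so it is recursed on the Nat value:
-- exact on Pre_, where the port is applied via '.toNat' to a nonnegative Int.
def pvLucasA : Nat → Int
  | 0 => 2
  | 1 => 1
  | n + 2 => pvLucasA (n + 1) + pvLucasA n

def LucasNum (start : Int) (stop : Int) (step : Int) : List Int :=
  let numbers := PySem.List.pyRange start stop step
  let numb := numbers.foldl (fun acc number => acc ++ [number]) []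
  let output := numb.foldl (fun acc n => acc ++ [pvLucasA n.toNat]) []
  output

-- ===== PORT B =====
def LucasNum_alt (start : Int) (stop : Int) (step : Int) : List Int :=
  let indices := PySem.List.pyRange start stop step
  let m := PySem.List.maxD indices (fun x => x) 1
  -- the while-style loop: state (table, a, b); 'table[i]' via pyGetD (exact on
  -- Pre_, where every index is nonnegative and within the table)
  let st := (PySem.List.pyRange 2 (m + 1) 1).foldl
      (fun (s : List Int × Int × Int) _ =>
        (s.1 ++ [s.2.1 + s.2.2], s.2.2, s.2.1 + s.2.2)) ([2, 1], 2, 1)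
  indices.map (fun i => PySem.List.pyGetD st.1 i 0)

-- ===== PRECONDITION & SPEC =====
-- Pre_ excludes step = 0 (range raises ValueError) and any range containing a
-- negative index (A's Lucas recursion never terminates there: RecursionError).
def Pre_LucasNum (start : Int) (stop : Int) (step : Int) : Prop :=
  step ≠ 0 ∧
  (0 < step → start < stop → 0 ≤ start) ∧
  (step < 0 → stop < start →
    0 ≤ start + step * (PySem.Int.floordiv (start - stop + -step - 1) (-step) - 1))
instance (start : Int) (stop : Int) (step : Int) : Decidable (Pre_LucasNum start stop step) := by
  unfold Pre_LucasNum; infer_instance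
def pvWitness_LucasNum : Int × Int × Int := (0, 6, 1)

def Spec_LucasNum (start : Int) (stop : Int) (step : Int) (out : List Int) : Prop := out = LucasNum_alt start stop step
instance (start : Int) (stop : Int) (step : Int) (out : List Int) : Decidable (Spec_LucasNum start stop step out) := by unfold Spec_LucasNum; infer_instance

-- ===== CLAIM (what is proved, stated in full; the proofs are below) =====
def Claim_equal_LucasNum : Prop := ∀ (start : Int) (stop : Int) (step : Int), Dom_LucasNum start stop step → Pre_LucasNum start stop step → Spec_LucasNum start stop step (LucasNum start stop step)

-- ===== LEMMAS AND PROOFS =====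

-- Pre_ says exactly: the range is well formed and all its members are ≥ 0
lemma pv_pre_nonneg (start stop step : Int) (h : Pre_LucasNum start stop step) :
    ∀ n ∈ PySem.List.pyRange start stop step, 0 ≤ n := by
  obtain ⟨hs, hpos, hneg⟩ := h
  intro n hmem
  rcases lt_trichotomy 0 step with hp | hz | hn
  · obtain ⟨h1, h2, -⟩ := (PySem.List.mem_pyRange_iff_of_pos hp n).mp hmem
    have := hpos hp (by omega)
    omega
  · exact absurd hz.symm hs
  · by_cases hlt : stop < start
    · have hd0 : (0 : Int) < -step := by omega
      set q : Int := PySem.Int.floordiv (start - stop + -step - 1) (-step) with hq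
      have hq1 : 1 ≤ q := by
        rw [hq, PySem.Int.le_floordiv_iff_mul_le hd0]
        omega
      have hcount : PySem.List.pyRange start stop step
          = (List.range q.toNat).map (fun k : Nat => start + step * (k : Int)) := by
        simp only [PySem.List.pyRange, if_neg hs]
        rw [if_neg (by omega : ¬ 0 < step), if_pos hlt, hq,
            PySem.Int.floordiv_eq_ediv_of_pos hd0]
      rw [hcount] at hmem
      obtain ⟨k, hk, rfl⟩ := List.mem_map.mp hmem
      have hkq : ((q.toNat : Nat) : Int) = q := Int.toNat_of_nonneg (by omega)
      have hkr : (k : Int) ≤ q - 1 := by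
        have := List.mem_range.mp hk
        omega
      have hlast := hneg hn hlt
      have hmul : step * (q - 1) ≤ step * (k : Int) :=
        mul_le_mul_of_nonpos_left hkr (by omega)
      linarith
    · have he : PySem.List.pyRange start stop step = [] := by
        simp only [PySem.List.pyRange, if_neg hs]
        rw [if_neg (by omega : ¬ 0 < step), if_neg hlt]
        simp
      rw [he] at hmem
      simp at hmem

-- the table after the loop for bound 2 + k
def pvLucTable (n : Nat) : List Int := (List.range n).map pvLucasA

lemma pv_fold_table (k : Nat) :
    (PySem.List.pyRange 2 (2 + (k : Int)) 1).foldl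
      (fun (s : List Int × Int × Int) _ =>
        (s.1 ++ [s.2.1 + s.2.2], s.2.2, s.2.1 + s.2.2)) ([2, 1], 2, 1)
    = (pvLucTable (k + 2), pvLucasA k, pvLucasA (k + 1)) := by
  induction k with
  | zero =>
    simp [PySem.List.pyRange_one_eq_nil, pvLucTable, List.range_succ, pvLucasA]
  | succ k ih =>
    have h : (2 : Int) ≤ 2 + (k : Int) := by omega
    have : (2 : Int) + ((k : Int) + 1) = (2 + (k : Int)) + 1 := by ring
    rw [show ((k : Nat) + 1 : Nat) = k + 1 from rfl, Nat.cast_add, Nat.cast_one, this,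
        PySem.List.pyRange_one_succ_right h, List.foldl_append, ih]
    simp only [List.foldl_cons, List.foldl_nil]
    have hrec : pvLucasA (k + 2) = pvLucasA k + pvLucasA (k + 1) := by
      show pvLucasA (k + 1) + pvLucasA k = _
      ring
    rw [← hrec]
    simp [pvLucTable, List.range_succ, show k + 1 + 2 = k + 2 + 1 from rfl,
          show k + 1 + 1 = k + 2 from rfl]

lemma pv_table_get (n : Nat) (i : Int) (h0 : 0 ≤ i) (h1 : i.toNat < n) :
    PySem.List.pyGetD (pvLucTable n) i 0 = pvLucasA i.toNat := by
  have hlen : i < ((pvLucTable n).length : Int) := by simp [pvLucTable]; omega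
  rw [PySem.List.pyGetD_eq_getElem (pvLucTable n) 0 h0 hlen]
  simp [pvLucTable]

-- ===== VERDICT (by name: the statement is the Claim_ definition above) =====
theorem LucasNum_spec : Claim_equal_LucasNum := by
  intro start stop step _hdom hpre
  have hnn := pv_pre_nonneg start stop step hpre
  unfold Spec_LucasNum LucasNum LucasNum_alt
  simp only [PySem.List.foldl_append_singleton_eq_map, List.nil_append, List.map_id_fun', id]
  set R := PySem.List.pyRange start stop step with hR
  rcases hRe : R with _ | ⟨r, rs⟩
  · simp
  · -- nonempty range: m is the max, every index i satisfies 0 ≤ i ≤ m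
    rw [← hRe]
    set m := PySem.List.maxD R (fun x => x) 1 with hm
    have hne : PySem.List.max? R (fun x => x) ≠ none := by
      simp [PySem.List.max?_eq_none_iff, hRe]
    obtain ⟨v, hv⟩ := Option.ne_none_iff_exists'.mp hne
    have hmax : PySem.List.max? R (fun x => x) = some m := by
      have : m = v := by rw [hm]; simp [PySem.List.maxD, hv]
      rw [this]; exact hv
    have hle : ∀ i ∈ R, i ≤ m := fun i hi => PySem.List.max?_isMax hmax i hi
    have hm0 : 0 ≤ m := hnn m (PySem.List.max?_mem hmax)
    -- the built table is pvLucTable N with N = max (m+1).toNat 2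
    have htab : ((PySem.List.pyRange 2 (m + 1) 1).foldl
        (fun (s : List Int × Int × Int) _ =>
          (s.1 ++ [s.2.1 + s.2.2], s.2.2, s.2.1 + s.2.2)) ([2, 1], 2, 1)).1
        = pvLucTable (max (m + 1).toNat 2) := by
      by_cases h1 : m ≤ 1
      · have : PySem.List.pyRange 2 (m + 1) 1 = [] :=
          PySem.List.pyRange_one_eq_nil (by omega)
        rw [this]
        have : max (m + 1).toNat 2 = 2 := by omega
        simp [this, pvLucTable, List.range_succ, pvLucasA]
      · have hk : m + 1 = 2 + ((m - 1).toNat : Int) := by omega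
        have h2 : max (m + 1).toNat 2 = (m - 1).toNat + 2 := by omega
        rw [h2, hk, pv_fold_table]
    rw [htab]
    apply List.map_congr_left
    intro i hi
    have h0 : 0 ≤ i := hnn i hi
    have h1 : i.toNat < max (m + 1).toNat 2 := by
      have := hle i hi; omega
    rw [pv_table_get _ _ h0 h1]
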